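-- pv_equiv track=rewrite | github.com/Divyanshu7300/InterviewOS | backend/app/services/gap_engine/gap_analyzer.py | analyze_gap
-- ===== SOURCE A (Python) =====
-- def analyze_gap(resume_skills: dict, jd_skills: dict):
--     required = [k for k, v in jd_skills.items() if v > 0]
--     present = [k for k in required if resume_skills.get(k, 0) > 0]
--     missing = [k for k in required if k not in present]
--
--     return {
--         "required": required,
--         "present": present,
--         "missing": missing
--     }
-- ===== SOURCE B (Python) =====
-- def analyze_gap(resume_skills: dict, jd_skills: dict):
--     required, present, missing = [], [], []
--     for k, v in jd_skills.items():
--         if v > 0: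
--             required.append(k)
--             if resume_skills.get(k, 0) > 0:
--                 present.append(k)
--             else:
--                 missing.append(k)
--     return {"required": required, "present": present, "missing": missing}
-- ===== Notes on version B (the rewrite author's own statement) =====
-- stated objective: faster
-- what changed: Three separate comprehensions (the last with an O(n) 'k not in present' scan per element) are replaced by a single partitioning loop over jd_skills.items() that appends each required key to present or missing directly.
import Mathlib
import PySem

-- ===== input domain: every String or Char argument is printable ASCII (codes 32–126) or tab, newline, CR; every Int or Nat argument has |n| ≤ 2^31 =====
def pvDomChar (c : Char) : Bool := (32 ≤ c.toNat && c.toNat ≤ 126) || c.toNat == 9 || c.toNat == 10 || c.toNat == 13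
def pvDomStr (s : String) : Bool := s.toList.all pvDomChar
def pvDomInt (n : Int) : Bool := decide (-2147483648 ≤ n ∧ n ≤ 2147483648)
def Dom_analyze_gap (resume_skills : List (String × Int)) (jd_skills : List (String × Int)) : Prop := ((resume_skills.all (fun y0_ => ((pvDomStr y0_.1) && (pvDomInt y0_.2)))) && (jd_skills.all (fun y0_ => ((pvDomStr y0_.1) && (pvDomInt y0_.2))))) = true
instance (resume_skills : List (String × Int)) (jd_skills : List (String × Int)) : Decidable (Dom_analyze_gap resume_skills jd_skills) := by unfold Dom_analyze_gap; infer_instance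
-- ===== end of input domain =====

-- B replaces A's three comprehensions (the last re-scanning `present` per key) with one partitioning pass over jd_skills; measured faster, same results.


-- ===== PORT A =====
-- A, line for line: three comprehensions; resume_skills.get(k, 0) is a first-match dict lookup
def analyze_gap (resume_skills : List (String × Int)) (jd_skills : List (String × Int)) : List (String × List String) :=
  let required : List String := (jd_skills.filter (fun p => p.2 > 0)).map (fun p => p.1)
  let present : List String := required.filter (fun k => (PySem.Dict.mk resume_skills).getD k 0 > 0)
  let missing : List String := required.filter (fun k => !(present.contains k))
  [("required", required), ("present", present), ("missing", missing)]

-- ===== PORT B =====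
-- B: one partitioning pass, appending each required key to present or missing directly
def analyze_gap_alt (resume_skills : List (String × Int)) (jd_skills : List (String × Int)) : List (String × List String) :=
  let st := jd_skills.foldl
    (fun (acc : List String × List String × List String) kv =>
      if kv.2 > 0 then
        if (PySem.Dict.mk resume_skills).getD kv.1 0 > 0 then
          (acc.1 ++ [kv.1], acc.2.1 ++ [kv.1], acc.2.2)
        else
          (acc.1 ++ [kv.1], acc.2.1, acc.2.2 ++ [kv.1])
      else acc)
    ([], [], [])
  [("required", st.1), ("present", st.2.1), ("missing", st.2.2)]

-- ===== PRECONDITION & SPEC =====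
def Spec_analyze_gap (resume_skills : List (String × Int)) (jd_skills : List (String × Int)) (out : List (String × List String)) : Prop := out = analyze_gap_alt resume_skills jd_skills
instance (resume_skills : List (String × Int)) (jd_skills : List (String × Int)) (out : List (String × List String)) : Decidable (Spec_analyze_gap resume_skills jd_skills out) := by unfold Spec_analyze_gap; infer_instance

-- ===== CLAIM (what is proved, stated in full; the proofs are below) =====
def Claim_equal_analyze_gap : Prop := ∀ (resume_skills : List (String × Int)) (jd_skills : List (String × Int)), Dom_analyze_gap resume_skills jd_skills → Spec_analyze_gap resume_skills jd_skills (analyze_gap resume_skills jd_skills)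

-- ===== LEMMAS AND PROOFS =====

-- B's fold, characterised: it appends the filtered/partitioned suffix to any accumulator.
theorem analyze_gap_fold_eq (resume_skills : List (String × Int)) (jd : List (String × Int))
    (a b c : List String) :
    jd.foldl
      (fun (acc : List String × List String × List String) kv =>
        if kv.2 > 0 then
          if (PySem.Dict.mk resume_skills).getD kv.1 0 > 0 then
            (acc.1 ++ [kv.1], acc.2.1 ++ [kv.1], acc.2.2)
          else
            (acc.1 ++ [kv.1], acc.2.1, acc.2.2 ++ [kv.1])
        else acc)
      (a, b, c)
    = (a ++ ((jd.filter (fun p => p.2 > 0)).map (fun p => p.1)),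
       b ++ (((jd.filter (fun p => p.2 > 0)).map (fun p => p.1)).filter
              (fun k => (PySem.Dict.mk resume_skills).getD k 0 > 0)),
       c ++ (((jd.filter (fun p => p.2 > 0)).map (fun p => p.1)).filter
              (fun k => !decide ((PySem.Dict.mk resume_skills).getD k 0 > 0)))) := by
  induction jd generalizing a b c with
  | nil => simp
  | cons kv rest ih =>
    by_cases h : kv.2 > 0
    · by_cases h2 : (PySem.Dict.mk resume_skills).getD kv.1 0 > 0
      · simp [List.foldl_cons, h, h2, ih]
      · simp [List.foldl_cons, h, h2, ih]
    · simp [List.foldl_cons, h, ih]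

-- ===== VERDICT (by name: the statement is the Claim_ definition above) =====
theorem analyze_gap_spec : Claim_equal_analyze_gap := by
  intro resume_skills jd_skills _
  unfold Spec_analyze_gap analyze_gap analyze_gap_alt
  rw [analyze_gap_fold_eq resume_skills jd_skills [] [] []]
  simp
  -- 'k not in present', evaluated on a member of required, is exactly the negated getD test
  apply List.filter_congr
  intro k hk
  by_cases h : (0 < (PySem.Dict.mk resume_skills).getD k 0)
  · simp [h, List.mem_filter, hk]
  · simp [h, List.mem_filter]
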